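-- pv_equiv track=rewrite | github.com/pjmbox/trailing | gui_aliases.py | _init_aliases_items
-- ===== SOURCE A (Python) =====
-- def _init_aliases_items(items, aliases):
--     length = 0
--     for i in range(len(aliases)):
--         tmp = aliases[i]['cmd']
--         if len(tmp) > length:
--             length = len(tmp)
--         items.append(aliases[i]['cmd'])
--     return length
-- ===== SOURCE B (Python) =====
-- def _init_aliases_items(items, aliases):
--     cmds = [a['cmd'] for a in aliases]
--     items.extend(cmds)
--     lens = sorted(len(c) for c in cmds)
--     return lens[-1] if lens else 0
-- ===== Notes on version B (the rewrite author's own statement) =====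
-- stated objective: alternative
-- what changed: Replaces the fused index loop with a running max by a selection-via-sort: build the cmd list, extend items once, sort the command lengths and return the last (largest) one, 0 when empty.
import Mathlib
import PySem

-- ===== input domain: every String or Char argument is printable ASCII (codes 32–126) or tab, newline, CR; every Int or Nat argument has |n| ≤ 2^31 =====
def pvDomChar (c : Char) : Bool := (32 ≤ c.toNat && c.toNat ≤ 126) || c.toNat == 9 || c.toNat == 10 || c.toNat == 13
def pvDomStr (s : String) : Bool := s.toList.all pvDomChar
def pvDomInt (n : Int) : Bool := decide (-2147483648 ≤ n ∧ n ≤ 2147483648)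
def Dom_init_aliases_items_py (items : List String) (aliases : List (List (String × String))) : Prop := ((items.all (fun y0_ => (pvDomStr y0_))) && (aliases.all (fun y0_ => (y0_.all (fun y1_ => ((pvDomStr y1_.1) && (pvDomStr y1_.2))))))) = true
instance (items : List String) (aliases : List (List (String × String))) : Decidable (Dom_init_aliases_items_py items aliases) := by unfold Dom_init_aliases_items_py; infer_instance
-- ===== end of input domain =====

-- B replaces A's fused loop (append + running max with a branch) by selection-via-sort:
-- build the cmd list, extend items once, sort the lengths and return the last one (0 when empty).
-- Equivalence is about the RETURN value; both mutate `items` by appending the same cmds in order.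

-- ===== PORT A =====
-- the for-loop over range(len(aliases)) reading aliases[i], as structural recursion over aliases
def pvGoA (aliases : List (List (String × String))) (length : Int) : Int :=
  match aliases with
  | [] => length
  | a :: rest =>
      let tmp := (PySem.Dict.get? (PySem.Dict.mk a) "cmd").getD ""   -- a['cmd']; none (KeyError) excluded by Pre_
      pvGoA rest (if PySem.Str.len tmp > length then PySem.Str.len tmp else length)

def init_aliases_items_py (items : List String) (aliases : List (List (String × String))) : Int :=
  pvGoA aliases 0

-- ===== PORT B =====
def init_aliases_items_py_alt (items : List String) (aliases : List (List (String × String))) : Int :=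
  let cmds := aliases.map (fun a => (PySem.Dict.get? (PySem.Dict.mk a) "cmd").getD "")
  let lens := PySem.List.sorted (cmds.map (fun c => PySem.Str.len c)) (fun x => x) false
  if h : lens = [] then 0 else (PySem.List.pyGet? lens (-1)).getD 0   -- lens[-1] if lens else 0

-- ===== PRECONDITION & SPEC =====
-- Pre_: every alias dict has the key 'cmd' (otherwise Python A raises KeyError)
def Pre_init_aliases_items_py (items : List String) (aliases : List (List (String × String))) : Prop :=
  ∀ a ∈ aliases, (PySem.Dict.get? (PySem.Dict.mk a) "cmd").isSome
instance (items : List String) (aliases : List (List (String × String))) : Decidable (Pre_init_aliases_items_py items aliases) := by unfold Pre_init_aliases_items_py; infer_instance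

def pvWitness_init_aliases_items_py : List String × (List (List (String × String))) :=
  (["x"], [[("cmd", "ls -l")], [("cmd", "cd")]])

def Spec_init_aliases_items_py (items : List String) (aliases : List (List (String × String))) (out : Int) : Prop := out = init_aliases_items_py_alt items aliases
instance (items : List String) (aliases : List (List (String × String))) (out : Int) : Decidable (Spec_init_aliases_items_py items aliases out) := by unfold Spec_init_aliases_items_py; infer_instance

-- ===== CLAIM (what is proved, stated in full; the proofs are below) =====
def Claim_equal_init_aliases_items_py : Prop := ∀ (items : List String) (aliases : List (List (String × String))), Dom_init_aliases_items_py items aliases → Pre_init_aliases_items_py items aliases → Spec_init_aliases_items_py items aliases (init_aliases_items_py items aliases)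

-- ===== LEMMAS AND PROOFS =====
-- A's loop is the running max of the cmd lengths
lemma pvGoA_eq_foldl (aliases : List (List (String × String))) (acc : Int) :
    pvGoA aliases acc =
      (aliases.map (fun a => PySem.Str.len ((PySem.Dict.get? (PySem.Dict.mk a) "cmd").getD ""))).foldl max acc := by
  induction aliases generalizing acc with
  | nil => rfl
  | cons a rest ih =>
      rw [pvGoA, List.map_cons, List.foldl_cons, ih]
      congr 1
      split_ifs with h <;> omega

-- the running max over any permutation agrees
lemma foldl_max_perm (l l' : List Int) (h : l.Perm l') (acc : Int) :
    l.foldl max acc = l'.foldl max acc := by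
  induction h generalizing acc with
  | nil => rfl
  | cons x _ ih => simp [List.foldl_cons, ih]
  | swap x y l => simp [List.foldl_cons, max_right_comm]
  | trans _ _ ih1 ih2 => rw [ih1, ih2]

-- on a nondecreasing nonempty list the running max is max of acc and the last element
lemma foldl_max_sorted (s : List Int) (h : s.Pairwise (· ≤ ·)) (hne : s ≠ []) (acc : Int) :
    s.foldl max acc = max acc (s.getLast hne) := by
  induction s generalizing acc with
  | nil => exact absurd rfl hne
  | cons a t ih =>
      cases t with
      | nil => simp
      | cons b u =>
          have hp : (b :: u).Pairwise (· ≤ ·) := h.of_cons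
          have hab : ∀ y ∈ b :: u, a ≤ y := fun y hy => List.rel_of_pairwise_cons h hy
          rw [List.foldl_cons, ih hp (List.cons_ne_nil _ _) (max acc a)]
          have he : (a :: b :: u).getLast hne = (b :: u).getLast (List.cons_ne_nil _ _) :=
            List.getLast_cons _
          have hl : a ≤ (b :: u).getLast (List.cons_ne_nil _ _) :=
            hab _ (List.getLast_mem _)
          rw [he]
          omega

-- ===== VERDICT (by name: the statement is the Claim_ definition above) =====
theorem init_aliases_items_py_spec : Claim_equal_init_aliases_items_py := by
  intro items aliases _ _
  unfold Spec_init_aliases_items_py init_aliases_items_py init_aliases_items_py_alt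
  set lens0 := (aliases.map (fun a => (PySem.Dict.get? (PySem.Dict.mk a) "cmd").getD "")).map
      (fun c => PySem.Str.len c) with hlens0
  have hA : pvGoA aliases 0 = lens0.foldl max 0 := by
    rw [pvGoA_eq_foldl, hlens0, List.map_map]; rfl
  set s := PySem.List.sorted lens0 (fun x => x) false with hs
  show pvGoA aliases 0 = if h : s = [] then 0 else (PySem.List.pyGet? s (-1)).getD 0
  have hperm : s.Perm lens0 := PySem.List.sorted_perm lens0 (fun x => x) false
  by_cases hni : s = []
  · have h0 : lens0 = [] := (List.Perm.nil_eq (hni ▸ hperm)).symm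
    rw [dif_pos hni, hA, h0]; rfl
  · have hpw : s.Pairwise (fun a b => (fun x : Int => x) a ≤ (fun x : Int => x) b) :=
      PySem.List.sorted_pairwise lens0 (fun x => x)
    have hlast : s.foldl max 0 = max 0 (s.getLast hni) := foldl_max_sorted s hpw hni 0
    have hmem : s.getLast hni ∈ lens0 := hperm.mem_iff.mp (List.getLast_mem hni)
    have hnn : 0 ≤ s.getLast hni := by
      rcases List.mem_map.mp hmem with ⟨c, _, hc⟩
      rw [← hc]
      simp [PySem.Str.len_eq]
    rw [dif_neg hni, hA, foldl_max_perm lens0 s hperm.symm 0, hlast,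
        PySem.List.pyGet?_neg_one, List.getLast?_eq_some_getLast hni]
    simp
    omega
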